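-- pv_equiv track=rewrite | github.com/CountChu/LeetCodePython | p_0001_0100/solutions/0022-gen-parentheses-p.py | gen_one
-- ===== SOURCE A (Python) =====
-- def gen_one(s_ls):
--     out = set()
--     n = len(s_ls)
--     for i in range(0, n+1):
--         new_s_ls = s_ls.copy()
--         new_s_ls.insert(i, '()')
--         s = ''.join(new_s_ls)
--         out.add(s)
--
--     return out
-- ===== SOURCE B (Python) =====
-- def gen_one(s_ls):
--     # Staged passes: build the suffix-join table by a right-to-left scan, then one
--     # left-to-right scan with a growing prefix accumulator emits pre + '()' + suf.
--     sufs = ['']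
--     for s in reversed(s_ls):
--         sufs.append(s + sufs[-1])
--     sufs.reverse()
--     out = set()
--     pre = ''
--     for s, suf in zip(s_ls, sufs):
--         out.add(pre + '()' + suf)
--         pre += s
--     out.add(pre + '()')
--     return out
-- ===== Notes on version B (the rewrite author's own statement) =====
-- stated objective: alternative
-- what changed: B replaces A's per-boundary copy/insert/re-join loop by two staged scans: a right-to-left fold building the table of suffix joins, then a single left scan with a growing prefix accumulator that emits pre + '()' + suf for each boundary.
import Mathlib
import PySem

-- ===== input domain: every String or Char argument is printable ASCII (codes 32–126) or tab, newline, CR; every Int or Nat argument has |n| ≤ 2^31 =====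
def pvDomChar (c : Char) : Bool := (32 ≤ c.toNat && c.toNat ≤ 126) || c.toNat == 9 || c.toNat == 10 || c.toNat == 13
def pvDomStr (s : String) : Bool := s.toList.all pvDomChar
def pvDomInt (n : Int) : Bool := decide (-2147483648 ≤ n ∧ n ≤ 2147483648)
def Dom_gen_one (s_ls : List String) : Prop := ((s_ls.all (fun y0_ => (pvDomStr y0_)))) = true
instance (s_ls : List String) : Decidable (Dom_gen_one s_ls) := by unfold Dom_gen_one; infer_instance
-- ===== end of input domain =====

-- B replaces A's per-boundary copy/insert/re-join loop by two staged scans: a right-to-left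
-- fold building the suffix-join table, then one left scan with a growing prefix accumulator
-- emitting pre ++ '()' ++ suf (alternative decomposition, similar cost).

-- ===== PORT A =====
def gen_one (s_ls : List String) : List String :=
  let n : Int := (s_ls.length : Int)
  (PySem.List.pyRange 0 (n + 1) 1).foldl
    (fun out i =>
      PySem.Set.add out (PySem.Str.join "" (PySem.List.insert s_ls i "()")))
    PySem.Set.empty

-- ===== PORT B =====
def gen_one_alt (s_ls : List String) : List String :=
  let sufs := (s_ls.reverse.foldl
      (fun sufs s => sufs ++ [s ++ sufs.getLastD ""]) [""]).reverse
  let st := (s_ls.zip sufs).foldl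
    (fun (p : PySem.Set String × String) x =>
      (PySem.Set.add p.1 (p.2 ++ "()" ++ x.2), p.2 ++ x.1))
    (PySem.Set.empty, "")
  PySem.Set.add st.1 (st.2 ++ "()")

-- ===== PRECONDITION & SPEC =====
def Spec_gen_one (s_ls : List String) (out : List String) : Prop := out = gen_one_alt s_ls
instance (s_ls : List String) (out : List String) : Decidable (Spec_gen_one s_ls out) := by unfold Spec_gen_one; infer_instance

-- ===== CLAIM (what is proved, stated in full; the proofs are below) =====
def Claim_equal_gen_one : Prop := ∀ (s_ls : List String), Dom_gen_one s_ls → Spec_gen_one s_ls (gen_one s_ls)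

-- ===== LEMMAS AND PROOFS =====

-- ''.join over List Char is flatten
theorem pv_join_nil_eq_flatten (as : List (List Char)) : PySem.Chars.join [] as = as.flatten := by
  simp only [PySem.Chars.join, List.intercalate]
  induction as with
  | nil => rfl
  | cons a t ih =>
    cases t with
    | nil => simp
    | cons b u => simp_all [List.intersperse]

theorem pv_join_empty : PySem.Str.join "" ([] : List String) = "" := by
  apply String.toList_inj.mp
  rw [PySem.Str.toList_join]
  rfl

-- ''.join distributes over cons
theorem pv_join_cons (h : String) (l : List String) :
    PySem.Str.join "" (h :: l) = h ++ PySem.Str.join "" l := by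
  apply String.toList_inj.mp
  rw [String.toList_append, PySem.Str.toList_join, PySem.Str.toList_join,
    show "".toList = ([] : List Char) from rfl, pv_join_nil_eq_flatten, pv_join_nil_eq_flatten]
  simp

-- ''.join distributes over append
theorem pv_join_append (a b : List String) :
    PySem.Str.join "" (a ++ b) = PySem.Str.join "" a ++ PySem.Str.join "" b := by
  apply String.toList_inj.mp
  rw [String.toList_append, PySem.Str.toList_join, PySem.Str.toList_join, PySem.Str.toList_join,
    show "".toList = ([] : List Char) from rfl, pv_join_nil_eq_flatten, pv_join_nil_eq_flatten,
    pv_join_nil_eq_flatten]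
  simp

-- the string A builds at boundary i
def pvVar (xs : List String) (i : Nat) : String :=
  PySem.Str.join "" (xs.take i ++ "()" :: xs.drop i)

-- the raw list of all boundary strings, in A's order
def pvAll (xs : List String) : List String :=
  (List.range (xs.length + 1)).map (pvVar xs)

theorem pvVar_eq (xs : List String) (i : Nat) :
    pvVar xs i = PySem.Str.join "" (xs.take i) ++ "()" ++ PySem.Str.join "" (xs.drop i) := by
  rw [pvVar, pv_join_append, pv_join_cons, ← String.append_assoc]

theorem pvVar_zero (xs : List String) : pvVar xs 0 = "()" ++ PySem.Str.join "" xs := by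
  rw [pvVar_eq]
  simp [pv_join_empty, String.empty_append]

theorem pvVar_succ (h : String) (tl : List String) (k : Nat) :
    pvVar (h :: tl) (k + 1) = h ++ pvVar tl k := by
  rw [pvVar_eq, pvVar_eq]
  simp [pv_join_cons, String.append_assoc]

theorem pvVar_last (xs : List String) :
    pvVar xs xs.length = PySem.Str.join "" xs ++ "()" := by
  rw [pvVar_eq]
  simp [pv_join_empty, String.append_empty]

-- the suffix-join table of B, recursively
def pvSufs : List String → List String
  | [] => [""]
  | h :: t => (h ++ PySem.Str.join "" t) :: pvSufs t

theorem pv_sufs_head (l : List String) : (pvSufs l).head? = some (PySem.Str.join "" l) := by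
  cases l with
  | nil => simp [pvSufs, pv_join_empty]
  | cons h t => simp [pvSufs, pv_join_cons]

-- B's first pass builds the suffix table back to front
theorem pv_fold_sufs (l : List String) :
    l.reverse.foldl (fun sufs s => sufs ++ [s ++ sufs.getLastD ""]) [""]
      = (pvSufs l).reverse := by
  induction l with
  | nil => rfl
  | cons h t ih =>
    rw [List.reverse_cons, List.foldl_concat, ih]
    rw [List.getLastD_eq_getLast?, List.getLast?_reverse, pv_sufs_head]
    simp [pvSufs]

-- B's second pass, characterised with an arbitrary starting set and prefix
theorem pv_loop (l : List String) (S : PySem.Set String) (pre : String) :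
    (l.zip (pvSufs l)).foldl
      (fun (p : PySem.Set String × String) x =>
        (PySem.Set.add p.1 (p.2 ++ "()" ++ x.2), p.2 ++ x.1))
      (S, pre)
    = (((List.range l.length).map (fun i => pre ++ pvVar l i)).foldl PySem.Set.add S,
       pre ++ PySem.Str.join "" l) := by
  induction l generalizing S pre with
  | nil => simp [pvSufs, pv_join_empty, String.append_empty]
  | cons h t ih =>
    rw [pvSufs, List.zip_cons_cons, List.foldl_cons, ih]
    rw [List.length_cons, List.range_succ_eq_map, List.map_cons, List.map_map]
    rw [List.foldl_cons]
    refine Prod.ext ?_ ?_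
    · dsimp only
      rw [pvVar_zero, pv_join_cons]
      congr 1
      · rw [String.append_assoc]
      · apply List.map_congr_left
        intro i _
        simp [Function.comp, Nat.succ_eq_add_one, pvVar_succ, String.append_assoc]
    · dsimp only
      rw [pv_join_cons, String.append_assoc]

-- B computes ofList of the raw boundary list
theorem pv_alt_eq (xs : List String) : gen_one_alt xs = PySem.Set.ofList (pvAll xs) := by
  simp only [gen_one_alt]
  rw [pv_fold_sufs, List.reverse_reverse, pv_loop]
  have hmap : (List.range xs.length).map (fun i => "" ++ pvVar xs i)
      = (List.range xs.length).map (pvVar xs) := by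
    apply List.map_congr_left
    intro i _
    exact String.empty_append
  rw [hmap, String.empty_append]
  have hall : pvAll xs = (List.range xs.length).map (pvVar xs) ++ [pvVar xs xs.length] := by
    rw [pvAll, List.range_succ, List.map_append]
    rfl
  rw [hall, PySem.Set.ofList_append_singleton, pvVar_last]
  rfl

-- A computes ofList of the raw boundary list
theorem pv_a_eq (xs : List String) : gen_one xs = PySem.Set.ofList (pvAll xs) := by
  simp only [gen_one]
  rw [PySem.List.pyRange_one,
    show (((xs.length : Int)) + 1 - 0).toNat = xs.length + 1 from by omega,
    List.foldl_map]
  refine Eq.trans (PySem.List.foldl_congr_mem _ _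
    (fun out k => PySem.Set.add out (pvVar xs k)) _ ?_) ?_
  · intro acc k hk
    have hk' : k ≤ xs.length := by have := List.mem_range.mp hk; omega
    rw [show (0 : Int) + (k : Int) = (k : Int) from by ring,
      PySem.List.insert_natCast xs k "()" hk']
    rfl
  · rw [← List.foldl_map]
    rfl

-- ===== VERDICT (by name: the statement is the Claim_ definition above) =====
theorem gen_one_spec : Claim_equal_gen_one := by
  intro s_ls _
  show gen_one s_ls = gen_one_alt s_ls
  rw [pv_a_eq, pv_alt_eq]
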